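-- pv_equiv track=rewrite | github.com/jk-jung/problem-solving | codewars/6kyu/6_Maximum Depth of Nested Brackets.py | strings_in_max_depth
-- ===== SOURCE A (Python) =====
-- def strings_in_max_depth(s):
--     st, t = 0, ''
--     r = []
--     for x in s:
--         if x == '(':
--             st += 1
--             t = ''
--         elif x == ')':
--             r.append((st, t))
--             st -= 1
--         else: t += x
--
--     if not r: return [s]
--     k = max(r)[0]
--     return [x[-1] for x in r if x[0] == k]
-- ===== SOURCE B (Python) =====
-- def strings_in_max_depth(s):
--     # pass 1: find the maximum depth at which any closing bracket occurs (depth before decrement)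
--     d = 0
--     best = None
--     for x in s:
--         if x == '(':
--             d += 1
--         elif x == ')':
--             if best is None or d > best:
--                 best = d
--             d -= 1
--     if best is None:
--         return [s]
--     # pass 2: collect the buffer at every closing bracket at that depth
--     d = 0
--     t = ''
--     out = []
--     for x in s:
--         if x == '(':
--             d += 1
--             t = ''
--         elif x == ')':
--             if d == best:
--                 out.append(t)
--             d -= 1
--         else:
--             t += x
--     return out
-- ===== Notes on version B (the rewrite author's own statement) =====
-- stated objective: alternative
-- what changed: B replaces A's materialised list of (depth, buffer) pairs plus a lexicographic max and a filtering comprehension by two plain scans: a first pass that only tracks the running depth and the maximal close-depth, and a second pass that emits the buffer at each closing bracket at that depth, so no pair list is ever built.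
import Mathlib
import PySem

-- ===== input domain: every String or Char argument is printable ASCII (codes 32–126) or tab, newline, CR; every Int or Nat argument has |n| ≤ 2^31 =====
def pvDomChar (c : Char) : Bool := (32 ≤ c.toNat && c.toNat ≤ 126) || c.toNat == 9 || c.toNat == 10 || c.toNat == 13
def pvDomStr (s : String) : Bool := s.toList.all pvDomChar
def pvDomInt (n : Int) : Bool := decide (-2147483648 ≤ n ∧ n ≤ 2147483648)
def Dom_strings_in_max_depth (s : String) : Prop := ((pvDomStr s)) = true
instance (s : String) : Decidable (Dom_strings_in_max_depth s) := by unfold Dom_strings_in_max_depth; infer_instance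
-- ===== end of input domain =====

-- B replaces A's materialised (depth, buffer) pair list + lexicographic max + filter
-- by two plain scans (max close-depth, then emit buffers at that depth); same O(n) cost.

-- ===== PORT A =====
-- one step of A's loop: state (st, t, r)
def pvStepA (acc : Int × List Char × List (Int × List Char)) (x : Char) :
    Int × List Char × List (Int × List Char) :=
  let (st, t, r) := acc
  if x = '(' then (st + 1, ([] : List Char), r)
  else if x = ')' then (st - 1, t, r ++ [(st, t)])
  else (st, t ++ [x], r)

def strings_in_max_depth (s : String) : List String :=
  let r := (s.toList.foldl pvStepA (0, [], [])).2.2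
  if r = [] then [s]
  else
    -- max(r) compares the tuples lexicographically (first key, then string key)
    let k : Int := ((PySem.List.max2? r (fun p => p.1) (fun p => p.2)).map (fun p => p.1)).getD 0
    (r.filter (fun p => p.1 == k)).map (fun p => String.mk p.2)

-- ===== PORT B =====
-- pass 1 step: state (d, best)
def pvStep1 (acc : Int × Option Int) (x : Char) : Int × Option Int :=
  let (d, best) := acc
  if x = '(' then (d + 1, best)
  else if x = ')' then
    (d - 1, match best with
            | none => some d
            | some b => if b < d then some d else some b)
  else (d, best)

-- pass 2 step: state (d, t, out)
def pvStep2 (k : Int) (acc : Int × List Char × List String) (x : Char) :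
    Int × List Char × List String :=
  let (d, t, out) := acc
  if x = '(' then (d + 1, ([] : List Char), out)
  else if x = ')' then (d - 1, t, if d == k then out ++ [String.mk t] else out)
  else (d, t ++ [x], out)

def strings_in_max_depth_alt (s : String) : List String :=
  let best := (s.toList.foldl pvStep1 (0, none)).2
  match best with
  | none => [s]
  | some k => (s.toList.foldl (pvStep2 k) (0, [], [])).2.2

-- ===== PRECONDITION & SPEC =====
def Spec_strings_in_max_depth (s : String) (out : List String) : Prop := out = strings_in_max_depth_alt s
instance (s : String) (out : List String) : Decidable (Spec_strings_in_max_depth s out) := by unfold Spec_strings_in_max_depth; infer_instance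

-- ===== CLAIM (what is proved, stated in full; the proofs are below) =====
def Claim_equal_strings_in_max_depth : Prop := ∀ (s : String), Dom_strings_in_max_depth s → Spec_strings_in_max_depth s (strings_in_max_depth s)

-- ===== LEMMAS AND PROOFS =====

-- the list of (close-depth, buffer) pairs produced from state (st, t)
def pvPairs (cs : List Char) (st : Int) (t : List Char) : List (Int × List Char) :=
  match cs with
  | [] => []
  | x :: cs =>
    if x = '(' then pvPairs cs (st + 1) []
    else if x = ')' then (st, t) :: pvPairs cs (st - 1) t
    else pvPairs cs st (t ++ [x])

-- pass-1's best update, as a fold step over the pairs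
def pvUpd (b : Option Int) (p : Int × List Char) : Option Int :=
  match b with
  | none => some p.1
  | some m => if m < p.1 then some p.1 else some m

-- the fold step of PySem.List.max2? at keys (·.1), (·.2)
def pvG (acc : Option (Int × List Char)) (x : Int × List Char) : Option (Int × List Char) :=
  match acc with
  | none => some x
  | some m =>
    if (decide (m.1 < x.1) || !decide (x.1 < m.1) && decide (m.2 < x.2)) = true
    then some x else some m

theorem pvMax2_eq_foldl (r : List (Int × List Char)) :
    PySem.List.max2? r (fun p => p.1) (fun p => p.2) = r.foldl pvG none := by
  unfold PySem.List.max2? pvG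
  congr 1
  funext acc x
  cases acc <;> rfl

-- A's loop produces exactly pvPairs in its r component
theorem pvStepA_pairs (cs : List Char) (st : Int) (t : List Char) (r : List (Int × List Char)) :
    (cs.foldl pvStepA (st, t, r)).2.2 = r ++ pvPairs cs st t := by
  induction cs generalizing st t r with
  | nil => simp [pvPairs]
  | cons x cs ih =>
    by_cases h1 : x = '('
    · simp [List.foldl, pvStepA, pvPairs, h1, ih]
    · by_cases h2 : x = ')'
      · simp [List.foldl, pvStepA, pvPairs, h1, h2, ih]
      · simp [List.foldl, pvStepA, pvPairs, h1, h2, ih]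

-- pass 1 computes the pvUpd-fold of the pairs (for ANY buffer t: firsts don't depend on it)
theorem pvStep1_best (cs : List Char) (st : Int) (t : List Char) (b : Option Int) :
    (cs.foldl pvStep1 (st, b)).2 = (pvPairs cs st t).foldl pvUpd b := by
  induction cs generalizing st t b with
  | nil => simp [pvPairs]
  | cons x cs ih =>
    by_cases h1 : x = '('
    · simp only [List.foldl, pvStep1, pvPairs, h1, if_pos rfl, if_true]
      exact ih _ [] _
    · by_cases h2 : x = ')'
      · simp only [List.foldl, pvStep1, pvPairs, h1, h2, if_false, if_true, if_neg h1,
          if_pos rfl, List.foldl_cons, pvUpd]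
        exact ih _ t _
      · simp only [List.foldl, pvStep1, pvPairs, if_neg h1, if_neg h2]
        exact ih _ (t ++ [x]) _

-- pass 2 collects the buffers of the pairs whose close-depth is k
theorem pvStep2_out (k : Int) (cs : List Char) (st : Int) (t : List Char) (out : List String) :
    (cs.foldl (pvStep2 k) (st, t, out)).2.2 =
      out ++ ((pvPairs cs st t).filter (fun p => p.1 == k)).map (fun p => String.mk p.2) := by
  induction cs generalizing st t out with
  | nil => simp [pvPairs]
  | cons x cs ih =>
    by_cases h1 : x = '('
    · simp [List.foldl, pvStep2, pvPairs, h1, ih]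
    · by_cases h2 : x = ')'
      · by_cases h3 : st = k
        · simp [List.foldl, pvStep2, pvPairs, h1, h2, h3, ih]
        · simp [List.foldl, pvStep2, pvPairs, h1, h2, h3, ih]
      · simp [List.foldl, pvStep2, pvPairs, h1, h2, ih]

-- ---- facts about the pvUpd fold (running max of first components) ----

theorem pvUpd_mono (l : List (Int × List Char)) (v : Int) :
    ∃ m, l.foldl pvUpd (some v) = some m ∧ v ≤ m := by
  induction l generalizing v with
  | nil => exact ⟨v, rfl, le_refl _⟩
  | cons p l ih =>
    simp only [List.foldl, pvUpd]
    by_cases h : v < p.1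
    · obtain ⟨m, hm, hvm⟩ := ih p.1
      exact ⟨m, by simpa [h] using hm, le_of_lt (lt_of_lt_of_le h hvm)⟩
    · obtain ⟨m, hm, hvm⟩ := ih v
      exact ⟨m, by simpa [h] using hm, hvm⟩

theorem pvUpd_step_le (b : Option Int) (p : Int × List Char) :
    ∃ v, pvUpd b p = some v ∧ p.1 ≤ v := by
  cases b with
  | none => exact ⟨p.1, rfl, le_refl _⟩
  | some c =>
    by_cases h : c < p.1
    · exact ⟨p.1, by simp [pvUpd, h], le_refl _⟩
    · exact ⟨c, by simp [pvUpd, h], le_of_not_gt h⟩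

theorem pvUpd_isMax (l : List (Int × List Char)) (b : Option Int) (m : Int)
    (hm : l.foldl pvUpd b = some m) : ∀ p ∈ l, p.1 ≤ m := by
  induction l generalizing b with
  | nil => intro p hp; simp at hp
  | cons q l ih =>
    intro p hp
    simp only [List.foldl] at hm
    rcases List.mem_cons.mp hp with rfl | hp'
    · obtain ⟨v, hv, hpv⟩ := pvUpd_step_le b p
      rw [hv] at hm
      obtain ⟨m', hm', hvm⟩ := pvUpd_mono l v
      rw [hm] at hm'
      have : m = m' := by injection hm'
      omega
    · exact ih _ hm p hp'

theorem pvUpd_mem (l : List (Int × List Char)) (b : Option Int) :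
    l.foldl pvUpd b = b ∨ ∃ p ∈ l, l.foldl pvUpd b = some p.1 := by
  induction l generalizing b with
  | nil => exact Or.inl rfl
  | cons q l ih =>
    simp only [List.foldl]
    rcases ih (pvUpd b q) with h | ⟨p, hp, h⟩
    · rw [h]
      cases b with
      | none => exact Or.inr ⟨q, List.mem_cons_self .., rfl⟩
      | some c =>
        by_cases hc : c < q.1
        · exact Or.inr ⟨q, List.mem_cons_self .., by simp [pvUpd, hc]⟩
        · exact Or.inl (by simp [pvUpd, hc])
    · exact Or.inr ⟨p, List.mem_cons_of_mem _ hp, h⟩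

-- ---- facts about the max2? fold (Python's lexicographic max over the tuples) ----

theorem pvG_mono (l : List (Int × List Char)) (q : Int × List Char) :
    ∃ m, l.foldl pvG (some q) = some m ∧ q.1 ≤ m.1 := by
  induction l generalizing q with
  | nil => exact ⟨q, rfl, le_refl _⟩
  | cons x l ih =>
    simp only [List.foldl, pvG]
    by_cases h : (decide (q.1 < x.1) || !decide (x.1 < q.1) && decide (q.2 < x.2)) = true
    · obtain ⟨m, hm, hxm⟩ := ih x
      refine ⟨m, by simpa [h] using hm, ?_⟩
      simp only [Bool.or_eq_true, Bool.and_eq_true, Bool.not_eq_true',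
        decide_eq_true_eq, decide_eq_false_iff_not] at h
      rcases h with h | ⟨h, _⟩
      · exact le_trans (le_of_lt h) hxm
      · exact le_trans (le_of_not_gt h) hxm
    · obtain ⟨m, hm, hqm⟩ := ih q
      exact ⟨m, by simpa [h] using hm, hqm⟩

theorem pvG_step_le (b : Option (Int × List Char)) (p : Int × List Char) :
    ∃ v, pvG b p = some v ∧ p.1 ≤ v.1 := by
  cases b with
  | none => exact ⟨p, rfl, le_refl _⟩
  | some c =>
    by_cases h : (decide (c.1 < p.1) || !decide (p.1 < c.1) && decide (c.2 < p.2)) = true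
    · exact ⟨p, by simp [pvG, h], le_refl _⟩
    · refine ⟨c, by simp [pvG, h], ?_⟩
      simp only [Bool.or_eq_true, Bool.and_eq_true, Bool.not_eq_true',
        decide_eq_true_eq, decide_eq_false_iff_not] at h
      push_neg at h
      exact h.1

theorem pvG_isMax (l : List (Int × List Char)) (b : Option (Int × List Char))
    (m : Int × List Char) (hm : l.foldl pvG b = some m) : ∀ p ∈ l, p.1 ≤ m.1 := by
  induction l generalizing b with
  | nil => intro p hp; simp at hp
  | cons q l ih =>
    intro p hp
    simp only [List.foldl] at hm
    rcases List.mem_cons.mp hp with rfl | hp'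
    · obtain ⟨v, hv, hpv⟩ := pvG_step_le b p
      rw [hv] at hm
      obtain ⟨m', hm', hvm⟩ := pvG_mono l v
      rw [hm] at hm'
      have : m = m' := by injection hm'
      subst this
      exact le_trans hpv hvm
    · exact ih _ hm p hp'

theorem pvG_mem (l : List (Int × List Char)) (b : Option (Int × List Char)) (m : Int × List Char)
    (hm : l.foldl pvG b = some m) : b = some m ∨ m ∈ l := by
  induction l generalizing b with
  | nil => exact Or.inl hm
  | cons q l ih =>
    simp only [List.foldl] at hm
    rcases ih _ hm with h | h
    · cases b with
      | none =>
        simp only [pvG] at h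
        injection h with h; subst h
        exact Or.inr (List.mem_cons_self ..)
      | some c =>
        by_cases hc : (decide (c.1 < q.1) || !decide (q.1 < c.1) && decide (c.2 < q.2)) = true
        · simp only [pvG, hc, if_true] at h
          injection h with h; subst h
          exact Or.inr (List.mem_cons_self ..)
        · simp only [pvG, hc, if_false] at h
          exact Or.inl h
    · exact Or.inr (List.mem_cons_of_mem _ h)

-- ===== VERDICT (by name: the statement is the Claim_ definition above) =====
theorem strings_in_max_depth_spec : Claim_equal_strings_in_max_depth := by
  intro s _
  unfold Spec_strings_in_max_depth strings_in_max_depth strings_in_max_depth_alt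
  have hA : (s.toList.foldl pvStepA (0, [], [])).2.2 = pvPairs s.toList 0 [] := by
    simpa using pvStepA_pairs s.toList 0 [] []
  have hB1 : (s.toList.foldl pvStep1 (0, none)).2 = (pvPairs s.toList 0 []).foldl pvUpd none :=
    pvStep1_best s.toList 0 [] none
  rw [hA, hB1]
  cases hr : pvPairs s.toList 0 [] with
  | nil => simp
  | cons p l =>
    -- A's branch: r ≠ []
    rw [if_neg (by simp)]
    -- B's best is some k'
    obtain ⟨k', hk', hpk'⟩ := pvUpd_mono l p.1
    have hbest : (p :: l).foldl pvUpd none = some k' := by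
      simpa [List.foldl, pvUpd] using hk'
    -- A's max2? is some m
    obtain ⟨m, hmeq, hpm⟩ := pvG_mono l p
    have hmax : (p :: l).foldl pvG none = some m := by
      simpa [List.foldl, pvG] using hmeq
    -- k' = m.1
    have hmem_m : m ∈ p :: l := by
      rcases pvG_mem (p :: l) none m hmax with h | h
      · cases h
      · exact h
    have h1 : m.1 ≤ k' := pvUpd_isMax (p :: l) none k' hbest m hmem_m
    have h2 : k' ≤ m.1 := by
      rcases pvUpd_mem (p :: l) none with h | ⟨q, hq, h⟩
      · rw [hbest] at h; cases h
      · rw [hbest] at h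
        have hk'q : k' = q.1 := by injection h
        rw [hk'q]
        exact pvG_isMax (p :: l) none m hmax q hq
    have hkm : k' = m.1 := le_antisymm h2 h1
    rw [hbest, pvMax2_eq_foldl, hmax]
    have hB2 := pvStep2_out k' s.toList 0 [] []
    rw [hr] at hB2
    simp only [List.nil_append] at hB2
    show (List.filter (fun p => p.1 == m.1) (p :: l)).map (fun p => String.mk p.2) =
      (List.foldl (pvStep2 k') (0, [], []) s.toList).2.2
    rw [hB2, hkm]
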